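-- pv_equiv track=rewrite | github.com/trucvy200200/HandwrittenRecognition-DIP- | src/his_horizontal.py | group_peaks
-- ===== SOURCE A (Python) =====
-- def group_peaks(peaks, max_dist) -> list:
--     groups = []
--     current_group = [peaks[0]]
--     for i in range(1, len(peaks)):
--         if peaks[i] - current_group[-1] <= max_dist:
--             current_group.append(peaks[i])
--         else:
--             groups.append((current_group[0], current_group[-1]))
--             current_group = [peaks[i]]
--     groups.append((current_group[0], current_group[-1]))
--     return groups
-- ===== SOURCE B (Python) =====
-- def group_peaks(peaks, max_dist) -> list:
--     n = len(peaks)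
--     breaks = [i for i in range(1, n) if peaks[i] - peaks[i - 1] > max_dist]
--     bounds = [0] + breaks + [n]
--     return [(peaks[s], peaks[e - 1]) for s, e in zip(bounds, bounds[1:])]
-- ===== Notes on version B (the rewrite author's own statement) =====
-- stated objective: alternative
-- what changed: Replaces A's single accumulating pass (groups list + mutable current_group buffer) by a staged index-based computation: first compute the list of break indices where the gap exceeds max_dist, then form run boundaries [0]+breaks and breaks+[n], and emit (peaks[s], peaks[e-1]) for each boundary pair.
import Mathlib
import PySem

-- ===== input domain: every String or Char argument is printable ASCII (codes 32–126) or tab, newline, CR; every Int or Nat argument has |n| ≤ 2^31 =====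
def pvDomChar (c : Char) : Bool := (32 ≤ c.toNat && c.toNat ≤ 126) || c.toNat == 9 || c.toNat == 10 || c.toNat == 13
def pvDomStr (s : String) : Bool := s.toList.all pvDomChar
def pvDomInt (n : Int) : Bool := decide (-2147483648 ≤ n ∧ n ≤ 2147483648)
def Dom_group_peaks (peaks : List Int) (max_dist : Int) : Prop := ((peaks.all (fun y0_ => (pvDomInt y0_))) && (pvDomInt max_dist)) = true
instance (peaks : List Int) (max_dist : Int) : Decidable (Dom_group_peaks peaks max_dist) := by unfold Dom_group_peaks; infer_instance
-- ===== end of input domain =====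

-- B replaces A's single accumulating pass (groups + current_group buffer) by a staged
-- computation: break indices first, then boundary pairs, then one emit per run (alternative).


-- ===== PORT A =====
-- loop body of A's for-loop (state = (groups, current_group), x = peaks[i])
def stepA (max_dist : Int) (st : List (Int × Int) × List Int) (x : Int) :
    List (Int × Int) × List Int :=
  if x - PySem.List.pyGetD st.2 (-1) 0 ≤ max_dist then
    (st.1, st.2 ++ [x])
  else
    (st.1 ++ [(PySem.List.pyGetD st.2 0 0, PySem.List.pyGetD st.2 (-1) 0)], [x])

-- trailing groups.append((current_group[0], current_group[-1]))
def finishA (st : List (Int × Int) × List Int) : List (Int × Int) :=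
  st.1 ++ [(PySem.List.pyGetD st.2 0 0, PySem.List.pyGetD st.2 (-1) 0)]

def group_peaks (peaks : List Int) (max_dist : Int) : List (Int × Int) :=
  finishA ((PySem.List.pyRange 1 (peaks.length : Int) 1).foldl
    (fun st i => stepA max_dist st (PySem.List.pyGetD peaks i 0))
    ([], [PySem.List.pyGetD peaks 0 0]))

-- ===== PORT B =====
-- breaks = [i for i in range(1, n) if peaks[i] - peaks[i-1] > max_dist];
-- bounds = [0] + breaks + [n]; [(peaks[s], peaks[e-1]) for s, e in zip(bounds, bounds[1:])]
def group_peaks_alt (peaks : List Int) (max_dist : Int) : List (Int × Int) :=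
  let n : Int := (peaks.length : Int)
  let breaks : List Int := (PySem.List.pyRange 1 n 1).filter
    (fun i => decide (PySem.List.pyGetD peaks i 0 - PySem.List.pyGetD peaks (i - 1) 0 > max_dist))
  let bounds : List Int := 0 :: (breaks ++ [n])
  (bounds.zip bounds.tail).map
    (fun se => (PySem.List.pyGetD peaks se.1 0, PySem.List.pyGetD peaks (se.2 - 1) 0))

-- ===== PRECONDITION & SPEC =====
-- Pre_ excludes only the empty list, on which Python A (and B alike) raises IndexError.
def Pre_group_peaks (peaks : List Int) (max_dist : Int) : Prop := peaks ≠ []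
instance (peaks : List Int) (max_dist : Int) : Decidable (Pre_group_peaks peaks max_dist) := by
  unfold Pre_group_peaks; infer_instance

def pvWitness_group_peaks : List Int × Int := ([3, 5, 20, 22], 10)

def Spec_group_peaks (peaks : List Int) (max_dist : Int) (out : List (Int × Int)) : Prop :=
  out = group_peaks_alt peaks max_dist
instance (peaks : List Int) (max_dist : Int) (out : List (Int × Int)) : Decidable (Spec_group_peaks peaks max_dist out) := by
  unfold Spec_group_peaks; infer_instance

-- ===== CLAIM (what is proved, stated in full; the proofs are below) =====
def Claim_equal_group_peaks : Prop := ∀ (peaks : List Int) (max_dist : Int), Dom_group_peaks peaks max_dist → Pre_group_peaks peaks max_dist → Spec_group_peaks peaks max_dist (group_peaks peaks max_dist)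

-- ===== LEMMAS AND PROOFS =====

-- reference recursion: goB d a b xs = groups of the run starting at a with previous element b
def goB (d a b : Int) : List Int → List (Int × Int)
  | [] => [(a, b)]
  | x :: xs => if x - b ≤ d then goB d a x xs else (a, b) :: goB d x x xs

def setFirst (a : Int) : List (Int × Int) → List (Int × Int)
  | (_, q) :: t => (a, q) :: t
  | [] => []

theorem goB_setFirst (d : Int) (ys : List Int) (a a' b : Int) :
    goB d a b ys = setFirst a (goB d a' b ys) := by
  induction ys generalizing b with
  | nil => simp [goB, setFirst]
  | cons y ys ih =>
    by_cases h : y - b ≤ d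
    · simpa [goB, h] using ih y
    · simp [goB, h, setFirst]

-- ---- A-side: reduce the foldl over pyRange to goB ----

theorem pyGetD_zero_append (cur : List Int) (x : Int) (h : cur ≠ []) :
    PySem.List.pyGetD (cur ++ [x]) 0 0 = PySem.List.pyGetD cur 0 0 := by
  cases cur with
  | nil => simp at h
  | cons c cs => simp [PySem.List.pyGetD_zero_cons]

theorem foldl_stepA_eq_goB (d : Int) (rest : List Int) (groups : List (Int × Int))
    (cur : List Int) (h : cur ≠ []) :
    finishA (rest.foldl (stepA d) (groups, cur)) =
      groups ++ goB d (PySem.List.pyGetD cur 0 0) (PySem.List.pyGetD cur (-1) 0) rest := by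
  induction rest generalizing groups cur with
  | nil => simp [finishA, goB]
  | cons x xs ih =>
    by_cases hx : x - PySem.List.pyGetD cur (-1) 0 ≤ d
    · have hstep : stepA d (groups, cur) x = (groups, cur ++ [x]) := by
        simp [stepA, hx]
      rw [List.foldl_cons, hstep, ih groups (cur ++ [x]) (by simp),
        pyGetD_zero_append cur x h, PySem.List.pyGetD_neg_one_append_singleton]
      simp [goB, hx]
    · have hstep : stepA d (groups, cur) x =
          (groups ++ [(PySem.List.pyGetD cur 0 0, PySem.List.pyGetD cur (-1) 0)], [x]) := by
        simp [stepA, hx]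
      have hx1 : PySem.List.pyGetD [x] (-1) 0 = x := rfl
      have hx2 : PySem.List.pyGetD [x] 0 0 = x := rfl
      rw [List.foldl_cons, hstep, ih _ [x] (by simp), hx1, hx2]
      simp only [goB]
      rw [if_neg hx]
      simp

-- ---- B-side: Nat-indexed mirror (breaks / emit) and its reduction to goB ----

def gapNat (l : List Int) (d : Int) (i : Nat) : Bool :=
  decide (l.getD i 0 - l.getD (i - 1) 0 > d)

def brkNat (d : Int) (l : List Int) : List Nat :=
  (List.range' 1 (l.length - 1)).filter (gapNat l d)

def emit (l : List Int) (s : Nat) : List Nat → List (Int × Int)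
  | [] => [(l.getD s 0, l.getD (l.length - 1) 0)]
  | e :: bs => (l.getD s 0, l.getD (e - 1) 0) :: emit l e bs

def outNat (d : Int) (l : List Int) : List (Int × Int) := emit l 0 (brkNat d l)

theorem pyGetD_len_sub_one (l : List Int) :
    PySem.List.pyGetD l ((l.length : Int) - 1) 0 = l.getD (l.length - 1) 0 := by
  cases l with
  | nil => rfl
  | cons a t =>
    have h : ((a :: t).length : Int) - 1 = ((t.length : Nat) : Int) := by
      simp
    rw [h, PySem.List.pyGetD_natCast]
    simp

theorem zip_emit (l : List Int) (bs : List Nat) (s : Nat)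
    (hbs : ∀ e ∈ bs, 1 ≤ e) :
    (((s : Int) :: (bs.map (Int.ofNat) ++ [(l.length : Int)])).zip
        (bs.map (Int.ofNat) ++ [(l.length : Int)])).map
      (fun se => (PySem.List.pyGetD l se.1 0, PySem.List.pyGetD l (se.2 - 1) 0)) =
    emit l s bs := by
  induction bs generalizing s with
  | nil =>
    simp only [List.map_nil, List.nil_append, List.zip_cons_cons, List.zip_nil_right,
      List.map_cons, List.map_nil, emit]
    rw [PySem.List.pyGetD_natCast, pyGetD_len_sub_one l]
  | cons e bs ih =>
    have he : 1 ≤ e := hbs e (by simp)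
    obtain ⟨f, rfl⟩ : ∃ f, e = f + 1 := ⟨e - 1, by omega⟩
    simp only [Int.ofNat_eq_natCast, List.map_cons, List.cons_append, List.zip_cons_cons,
      List.map_cons]
    rw [show ((((f + 1 : Nat)) : Int)) - 1 = ((f : Nat) : Int) by push_cast; ring]
    rw [ih (f + 1) (fun x hx => hbs x (by simp [hx]))]
    simp [emit, PySem.List.pyGetD_natCast]

theorem brkNat_mem_ge_one (d : Int) (l : List Int) :
    ∀ e ∈ brkNat d l, 1 ≤ e := by
  intro e he
  have := List.mem_range'_1.mp (List.mem_of_mem_filter he)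
  exact this.1

theorem range'_one_eq_map (m : Nat) :
    List.range' 1 m = (List.range m).map (fun k => 1 + k) :=
  List.range'_eq_map_range

theorem breaks_port_eq_brkNat (l : List Int) (d : Int) :
    (PySem.List.pyRange 1 (l.length : Int) 1).filter
      (fun i => decide (PySem.List.pyGetD l i 0 - PySem.List.pyGetD l (i - 1) 0 > d)) =
    (brkNat d l).map (Int.ofNat) := by
  have hr : PySem.List.pyRange 1 (l.length : Int) 1 =
      (List.range' 1 (l.length - 1)).map (Int.ofNat) := by
    rw [PySem.List.pyRange_one, range'_one_eq_map, List.map_map]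
    have hn : (((l.length : Int) - 1)).toNat = l.length - 1 := by omega
    rw [hn]
    apply List.map_congr_left
    intro k _
    simp [Int.ofNat_eq_natCast]
  rw [hr, List.filter_map]
  unfold brkNat
  congr 1
  apply List.filter_congr
  intro i hi
  have h1 : 1 ≤ i := (List.mem_range'_1.mp hi).1
  have hgi : PySem.List.pyGetD l ((i : Nat) : Int) 0 = l.getD i 0 := by
    simp [PySem.List.pyGetD_natCast]
  have hgi1 : PySem.List.pyGetD l (((i : Nat) : Int) - 1) 0 = l.getD (i - 1) 0 := by
    have : ((i : Nat) : Int) - 1 = (((i - 1 : Nat)) : Int) := by omega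
    rw [this, PySem.List.pyGetD_natCast]
  simp only [Function.comp, Int.ofNat_eq_natCast, hgi, hgi1, gapNat]

theorem group_peaks_alt_eq_outNat (l : List Int) (d : Int) :
    group_peaks_alt l d = outNat d l := by
  unfold group_peaks_alt outNat
  simp only [List.tail_cons]
  rw [breaks_port_eq_brkNat l d]
  have := zip_emit l (brkNat d l) 0 (brkNat_mem_ge_one d l)
  simpa using this

-- emit ignores its start index except in the first pair's first component
theorem emit_setFirst (l : List Int) (s s' : Nat) (bs : List Nat) :
    emit l s bs = setFirst (l.getD s 0) (emit l s' bs) := by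
  cases bs <;> simp [emit, setFirst]

-- shifting every index down by one steps from p :: rest to rest
theorem emit_shift (l : List Int) (p : Int) (bs : List Nat) (s : Nat)
    (hne : l ≠ []) (hbs : ∀ e ∈ bs, 1 ≤ e) :
    emit (p :: l) (s + 1) (bs.map (· + 1)) = emit l s bs := by
  induction bs generalizing s with
  | nil =>
    have hlen : (p :: l).length - 1 = (l.length - 1) + 1 := by
      cases l with
      | nil => exact absurd rfl hne
      | cons a t => simp
    simp only [List.map_nil, emit, hlen, List.getD_cons_succ]
  | cons e bs ih =>
    have he : 1 ≤ e := hbs e (by simp)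
    obtain ⟨f, rfl⟩ : ∃ f, e = f + 1 := ⟨e - 1, by omega⟩
    simp only [List.map_cons, emit, List.getD_cons_succ, Nat.add_sub_cancel]
    rw [ih (f + 1) (fun x hx => hbs x (by simp [hx]))]

theorem brkNat_shift (d p q : Int) (t : List Int) :
    brkNat d (p :: q :: t) =
      (if q - p > d then [1] else []) ++ (brkNat d (q :: t)).map (· + 1) := by
  unfold brkNat
  have hlen : (p :: q :: t).length - 1 = ((q :: t).length - 1) + 1 := by simp
  rw [hlen, List.range'_succ]
  have h2 : List.range' 2 ((q :: t).length - 1) =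
      (List.range' 1 ((q :: t).length - 1)).map (· + 1) := by
    rw [range'_one_eq_map, List.range'_eq_map_range, List.map_map]
    apply List.map_congr_left
    intro k _
    simp; omega
  rw [List.filter_cons, h2, List.filter_map]
  have hhead : gapNat (p :: q :: t) d 1 = decide (q - p > d) := by
    simp [gapNat]
  have hcongr : List.filter (gapNat (p :: q :: t) d ∘ (· + 1))
      (List.range' 1 ((q :: t).length - 1)) =
      List.filter (gapNat (q :: t) d) (List.range' 1 ((q :: t).length - 1)) := by
    apply List.filter_congr
    intro i hi
    have h1 : 1 ≤ i := (List.mem_range'_1.mp hi).1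
    obtain ⟨j, rfl⟩ : ∃ j, i = j + 1 := ⟨i - 1, by omega⟩
    simp [Function.comp, gapNat]
  rw [hhead, hcongr]
  by_cases h : q - p > d <;> simp [h]

theorem outNat_eq_goB (d : Int) (rest : List Int) (p : Int) :
    outNat d (p :: rest) = goB d p p rest := by
  induction rest generalizing p with
  | nil =>
    unfold outNat brkNat
    simp [emit, goB]
  | cons q t ih =>
    unfold outNat
    rw [brkNat_shift]
    by_cases h : q - p > d
    · simp only [h, if_pos, List.cons_append, List.nil_append]
      have : emit (p :: q :: t) 0 (1 :: (brkNat d (q :: t)).map (· + 1)) =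
          (p, p) :: emit (p :: q :: t) 1 ((brkNat d (q :: t)).map (· + 1)) := by
        simp [emit]
      rw [this, show (1 : Nat) = 0 + 1 from rfl,
        emit_shift (q :: t) p _ 0 (by simp) (brkNat_mem_ge_one d (q :: t))]
      have hgo : goB d p p (q :: t) = (p, p) :: goB d q q t := by
        simp [goB, show ¬ (q - p ≤ d) by omega]
      rw [hgo, ← outNat, ih q]
    · simp only [h, if_neg, not_false_iff, List.nil_append]
      rw [emit_setFirst (p :: q :: t) 0 1 _,
        show (1 : Nat) = 0 + 1 from rfl,
        emit_shift (q :: t) p _ 0 (by simp) (brkNat_mem_ge_one d (q :: t)),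
        ← outNat, ih q]
      have hgo : goB d p p (q :: t) = goB d p q t := by
        simp [goB, show q - p ≤ d by omega]
      rw [hgo, goB_setFirst d t p q q]
      simp

-- ===== VERDICT =====
theorem group_peaks_spec : Claim_equal_group_peaks := by
  intro peaks max_dist _ hpre
  unfold Spec_group_peaks
  cases peaks with
  | nil => exact absurd rfl hpre
  | cons p rest =>
    unfold group_peaks
    rw [PySem.List.foldl_pyRange_pyGetD' (p :: rest) 0 (stepA max_dist)
      ([], [PySem.List.pyGetD (p :: rest) 0 0]) (by norm_num : (0:Int) ≤ 1)]
    have h1 : PySem.List.pyGetD (p :: rest) 0 0 = p := PySem.List.pyGetD_zero_cons p rest 0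
    have h2 : (p :: rest).drop (1 : Int).toNat = rest := by simp
    rw [h1, h2, foldl_stepA_eq_goB max_dist rest [] [p] (by simp)]
    rw [group_peaks_alt_eq_outNat, outNat_eq_goB]
    simp [PySem.List.pyGetD_zero_cons]
    rfl
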